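-- pv_equiv track=rewrite | github.com/Vasyl-Bodnar/image-processing | main.py | count_successes_fails
-- ===== SOURCE A (Python) =====
-- def dflatten(l):
--     return [
--         item
--         for sublist in [item for sublist in l for item in sublist]
--         for item in sublist
--     ]
--
-- def count_successes_fails(collect):
--     return (
--         sum([1 if c[0] == c[1][0][1] else 0 for c in dflatten(collect)]),
--         sum(
--             [
--                 1
--                 if c[0].__contains__("poison") and c[1][0][1].__contains__("poison")
--                 else 0
--                 for c in dflatten(collect)
--             ]
--         ),
--         sum(
--             [
--                 1
--                 if (not c[0].__contains__("poison")) and (not c[1][0][1].__contains__("poison"))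
--                 else 0
--                 for c in dflatten(collect)
--             ]
--         ),
--         sum(
--             [
--                 1
--                 if c[0].__contains__("poison") and (not c[1][0][1].__contains__("poison"))
--                 else 0
--                 for c in dflatten(collect)
--             ]
--         ),
--         sum(
--             [
--                 1
--                 if (not c[0].__contains__("poison")) and c[1][0][1].__contains__("poison")
--                 else 0
--                 for c in dflatten(collect)
--             ]
--         ),
--     )
-- ===== SOURCE B (Python) =====
-- def count_successes_fails(collect):
--     # One fused pass over the flattened collection: keep only marginal counts
--     # and derive the confusion-matrix cells by inclusion-exclusion.
--     n = a = b = x = m = 0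
--     for outer in collect:
--         for mid in outer:
--             for c in mid:
--                 pred = c[0]
--                 truth = c[1][0][1]
--                 pa = "poison" in pred
--                 pb = "poison" in truth
--                 n += 1
--                 if pa:
--                     a += 1
--                 if pb:
--                     b += 1
--                 if pa and pb:
--                     x += 1
--                 if pred == truth:
--                     m += 1
--     return (m, x, n - a - b + x, a - x, b - x)
-- ===== Notes on version B (the rewrite author's own statement) =====
-- stated objective: faster
-- what changed: Replaces A's five separate map-and-sum passes (each re-flattening the collection) by one fused pass that maintains only marginal counts (N, matches, poison-in-prediction, poison-in-truth, both) and derives the three remaining confusion-matrix cells by inclusion-exclusion.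
import Mathlib
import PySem

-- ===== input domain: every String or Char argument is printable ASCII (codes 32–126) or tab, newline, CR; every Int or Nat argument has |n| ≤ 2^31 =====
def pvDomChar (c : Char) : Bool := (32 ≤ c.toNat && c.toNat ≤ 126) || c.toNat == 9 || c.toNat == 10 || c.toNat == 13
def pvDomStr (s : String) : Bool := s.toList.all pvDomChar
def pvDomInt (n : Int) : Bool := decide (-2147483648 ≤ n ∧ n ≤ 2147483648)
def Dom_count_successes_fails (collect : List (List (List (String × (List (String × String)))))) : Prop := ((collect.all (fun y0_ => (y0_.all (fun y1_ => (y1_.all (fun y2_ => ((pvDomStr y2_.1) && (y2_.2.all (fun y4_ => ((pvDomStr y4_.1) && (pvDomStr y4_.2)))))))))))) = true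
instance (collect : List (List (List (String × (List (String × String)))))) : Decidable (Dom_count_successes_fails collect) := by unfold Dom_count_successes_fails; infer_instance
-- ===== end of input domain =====

-- B replaces A's five separate passes over the flattened collection by one fused pass that
-- keeps marginal counts and derives the confusion-matrix cells by inclusion-exclusion (objective: alternative).

-- c[1][0][1]: Python raises IndexError when c[1] is empty; Pre_ excludes that, the default is never read inside Pre_.
def pvTruth (c : String × (List (String × String))) : String :=
  ((PySem.List.pyGet? c.2 0).getD ("", "")).2

-- ===== PORT A =====
-- dflatten: the double nested comprehension flattens two levels
def pvDflatten (l : List (List (List (String × (List (String × String)))))) :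
    List (String × (List (String × String))) :=
  ((l.flatMap id).flatMap id)

def count_successes_fails (collect : List (List (List (String × (List (String × String)))))) : List Int :=
  let fl := pvDflatten collect
  [ (fl.map (fun c => if c.1 == pvTruth c then (1 : Int) else 0)).sum,
    (fl.map (fun c => if PySem.Str.isIn "poison" c.1 && PySem.Str.isIn "poison" (pvTruth c) then (1 : Int) else 0)).sum,
    (fl.map (fun c => if !(PySem.Str.isIn "poison" c.1) && !(PySem.Str.isIn "poison" (pvTruth c)) then (1 : Int) else 0)).sum,
    (fl.map (fun c => if PySem.Str.isIn "poison" c.1 && !(PySem.Str.isIn "poison" (pvTruth c)) then (1 : Int) else 0)).sum,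
    (fl.map (fun c => if !(PySem.Str.isIn "poison" c.1) && PySem.Str.isIn "poison" (pvTruth c) then (1 : Int) else 0)).sum ]

-- ===== PORT B =====
-- one step of B's fused loop: update (n, a, b, x, m)
def pvStep (s : Int × Int × Int × Int × Int) (c : String × (List (String × String))) :
    Int × Int × Int × Int × Int :=
  let pred := c.1
  let truth := pvTruth c
  let pa := PySem.Str.isIn "poison" pred
  let pb := PySem.Str.isIn "poison" truth
  (s.1 + 1,
   s.2.1 + (if pa then 1 else 0),
   s.2.2.1 + (if pb then 1 else 0),
   s.2.2.2.1 + (if pa && pb then 1 else 0),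
   s.2.2.2.2 + (if pred == truth then 1 else 0))

def count_successes_fails_alt (collect : List (List (List (String × (List (String × String)))))) : List Int :=
  let s := collect.foldl (fun acc outer => outer.foldl (fun acc' mid => mid.foldl pvStep acc') acc) (0, 0, 0, 0, 0)
  match s with
  | (n, a, b, x, m) => [m, x, n - a - b + x, a - x, b - x]

-- ===== PRECONDITION & SPEC =====
-- A raises IndexError (c[1][0]) on any flattened element whose second component is the empty list; Pre_ excludes exactly those.
def Pre_count_successes_fails (collect : List (List (List (String × (List (String × String)))))) : Prop :=
  ∀ o ∈ collect, ∀ mi ∈ o, ∀ c ∈ mi, c.2 ≠ []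
instance (collect : List (List (List (String × (List (String × String)))))) : Decidable (Pre_count_successes_fails collect) := by unfold Pre_count_successes_fails; infer_instance

def pvWitness_count_successes_fails : (List (List (List (String × (List (String × String)))))) :=
  [[[("poison", [("t", "poison")])], [("ok", [("t", "ok")])]]]

def Spec_count_successes_fails (collect : List (List (List (String × (List (String × String)))))) (out : List Int) : Prop := out = count_successes_fails_alt collect
instance (collect : List (List (List (String × (List (String × String)))))) (out : List Int) : Decidable (Spec_count_successes_fails collect out) := by unfold Spec_count_successes_fails; infer_instance

-- ===== CLAIM (what is proved, stated in full; the proofs are below) =====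
def Claim_equal_count_successes_fails : Prop := ∀ (collect : List (List (List (String × (List (String × String)))))), Dom_count_successes_fails collect → Pre_count_successes_fails collect → Spec_count_successes_fails collect (count_successes_fails collect)

-- ===== LEMMAS AND PROOFS =====

-- B's triple nested fold is the fold over the doubly flattened list
theorem foldl_pvDflatten (collect : List (List (List (String × (List (String × String))))))
    (s : Int × Int × Int × Int × Int) :
    collect.foldl (fun acc outer => outer.foldl (fun acc' mid => mid.foldl pvStep acc') acc) s
      = (pvDflatten collect).foldl pvStep s := by
  simp only [pvDflatten, List.flatMap_id, List.foldl_flatten]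

-- what B's fold computes: the five marginal counts
theorem foldl_pvStep_spec (fl : List (String × (List (String × String))))
    (n a b x m : Int) :
    fl.foldl pvStep (n, a, b, x, m) =
      (n + fl.length,
       a + (fl.countP (fun c => PySem.Str.isIn "poison" c.1) : Int),
       b + (fl.countP (fun c => PySem.Str.isIn "poison" (pvTruth c)) : Int),
       x + (fl.countP (fun c => PySem.Str.isIn "poison" c.1 && PySem.Str.isIn "poison" (pvTruth c)) : Int),
       m + (fl.countP (fun c => c.1 == pvTruth c) : Int)) := by
  induction fl generalizing n a b x m with
  | nil => simp
  | cons c t ih =>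
      simp only [List.foldl_cons, pvStep, ih, List.countP_cons]
      cases hpa : PySem.Str.isIn "poison" c.1 <;>
        cases hpb : PySem.Str.isIn "poison" (pvTruth c) <;>
        cases hm : c.1 == pvTruth c <;>
        simp <;> (try ring_nf) <;> (try trivial)

-- inclusion-exclusion for counts, as Int identities
theorem countP_not_not_int {α : Type} (l : List α) (p q : α → Bool) :
    (l.countP (fun c => !(p c) && !(q c)) : Int)
      = l.length - l.countP p - l.countP q + l.countP (fun c => p c && q c) := by
  induction l with
  | nil => simp
  | cons c t ih =>
      simp only [List.countP_cons, List.length_cons]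
      cases hp : p c <;> cases hq : q c <;> simp <;> push_cast at ih <;> omega

theorem countP_and_not_int {α : Type} (l : List α) (p q : α → Bool) :
    (l.countP (fun c => p c && !(q c)) : Int)
      = l.countP p - l.countP (fun c => p c && q c) := by
  induction l with
  | nil => simp
  | cons c t ih =>
      simp only [List.countP_cons]
      cases hp : p c <;> cases hq : q c <;> simp <;> push_cast at ih <;> omega

theorem countP_not_and_int {α : Type} (l : List α) (p q : α → Bool) :
    (l.countP (fun c => !(p c) && q c) : Int)
      = l.countP q - l.countP (fun c => p c && q c) := by
  induction l with
  | nil => simp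
  | cons c t ih =>
      simp only [List.countP_cons]
      cases hp : p c <;> cases hq : q c <;> simp <;> push_cast at ih <;> omega

-- ===== VERDICT (by name: the statement is the Claim_ definition above) =====
theorem count_successes_fails_spec : Claim_equal_count_successes_fails := by
  intro collect _ _
  unfold Spec_count_successes_fails count_successes_fails count_successes_fails_alt
  rw [foldl_pvDflatten, foldl_pvStep_spec]
  simp only [PySem.List.sum_map_ite_one_zero, zero_add]
  rw [countP_not_not_int, countP_and_not_int, countP_not_and_int]
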